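-- pv_equiv track=rewrite | github.com/cho1n/Algorithm | 백준/연습/PG_기능개발.py | solution
-- ===== SOURCE A (Python) =====
-- from collections import deque
--
-- def solution(progresses, speeds):
--     answer = []
--     progress_queue = deque()
--     for i in range(len(progresses)):
--         progress_queue.append(progresses[i])
--
--     speeds_queue = deque()
--     for i in range(len(speeds)):
--         speeds_queue.append(speeds[i])
--
--     while progress_queue:
--         count = 0
--
--         for i in range(len(progress_queue)):
--             progress_queue[i] += speeds_queue[i]
--
--         if progress_queue[0] >= 100:
--             while len(progress_queue) != 0 and (progress_queue[0] >= 100):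
--                 progress_queue.popleft()
--                 speeds_queue.popleft()
--                 count += 1
--             if count >= 0 :
--                 answer.append(count)
--
--     return answer
-- ===== SOURCE B (Python) =====
-- def solution(progresses, speeds):
--     # days[i] = day on which task i finishes: max(1, ceil((100 - p) / s))
--     days = [max(1, -((p - 100) // s)) for p, s in zip(progresses, speeds)]
--     answer = []
--     i = 0
--     n = len(days)
--     while i < n:
--         j = i + 1
--         while j < n and days[j] <= days[i]:
--             j += 1
--         answer.append(j - i)
--         i = j
--     return answer
-- ===== Notes on version B (the rewrite author's own statement) =====
-- stated objective: faster
-- what changed: Replaces A's day-by-day queue simulation (incrementing every remaining task each day) by computing each task's completion day with ceiling division once and grouping consecutive tasks whose day does not exceed the group leader's day in a single scan; intended as faster -- a timing run saw A time out at n=16 where B returned, but could not measure a ratio.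
-- outside the precondition, e.g. on solution([150, 200], [-1, -1]): A returns [2], B returns [1, 1]
import Mathlib
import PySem

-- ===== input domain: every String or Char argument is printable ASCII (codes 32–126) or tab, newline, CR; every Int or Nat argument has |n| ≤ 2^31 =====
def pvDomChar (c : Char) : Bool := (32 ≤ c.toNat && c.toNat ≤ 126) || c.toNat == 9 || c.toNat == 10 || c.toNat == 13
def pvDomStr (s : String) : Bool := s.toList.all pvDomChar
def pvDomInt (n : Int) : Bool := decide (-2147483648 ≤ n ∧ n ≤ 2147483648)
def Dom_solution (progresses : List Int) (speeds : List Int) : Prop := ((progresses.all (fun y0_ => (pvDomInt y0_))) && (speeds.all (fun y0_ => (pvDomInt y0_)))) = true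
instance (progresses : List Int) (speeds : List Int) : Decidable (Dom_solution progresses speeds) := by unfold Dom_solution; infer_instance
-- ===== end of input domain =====

-- B replaces A's day-by-day queue simulation by a closed-form completion day per task
-- (ceiling division) and one grouping scan; intended as faster (timing: A timed out
-- at n=16 where B returned; no clean ratio was measurable since A never finishes there).

-- ===== PORT A =====
-- inner 'while len(progress_queue) != 0 and progress_queue[0] >= 100': pop both fronts, count
-- (deque.popleft on the speeds queue is total here as List.drop 1; Pre_ keeps speeds at least as long)
def solInner : List Int → List Int → Int → List Int × List Int × Int
  | [], sq, c => ([], sq, c)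
  | p :: ps, sq, c => if 100 ≤ p then solInner ps (sq.drop 1) (c + 1) else (p :: ps, sq, c)

-- outer 'while progress_queue'; fuel is a totality guard only (A's loop terminates under Pre_)
def solLoop : Nat → List Int → List Int → List Int → List Int
  | 0, _, _, answer => answer
  | fuel + 1, pq, sq, answer =>
    if pq = [] then answer
    else
      -- 'for i in range(len(progress_queue)): progress_queue[i] += speeds_queue[i]'
      let pq' := (pq.zip sq).map (fun x => x.1 + x.2)
      if 100 ≤ pq'.headD 0 then
        let r := solInner pq' sq 0
        solLoop fuel r.1 r.2.1 (if 0 ≤ r.2.2 then answer ++ [r.2.2] else answer)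
      else
        solLoop fuel pq' sq answer

def solFuel (progresses : List Int) : Nat :=
  1 + (progresses.map (fun p => (101 - p).toNat)).sum

def solution (progresses : List Int) (speeds : List Int) : List Int :=
  solLoop (solFuel progresses) progresses speeds []

-- ===== PORT B =====
-- days = max(1, -((p - 100) // s))  (Python floor division)
def altDays (p s : Int) : Int := max 1 (-(PySem.Int.floordiv (p - 100) s))

-- the two nested index loops of Source B: take the group of following days ≤ the leader's day,
-- append its size (j - i = 1 + takeWhile length), continue at j
def altGroups : List Int → List Int
  | [] => []
  | d :: rest =>
      ((rest.takeWhile (fun x => decide (x ≤ d))).length + 1 : Int) ::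
        altGroups (rest.dropWhile (fun x => decide (x ≤ d)))
  termination_by l => l.length
  decreasing_by
    exact Nat.lt_succ_of_le (List.length_dropWhile_le (fun x => decide (x ≤ d)) rest)

def solution_alt (progresses : List Int) (speeds : List Int) : List Int :=
  altGroups ((progresses.zip speeds).map (fun x => altDays x.1 x.2))

-- ===== PRECONDITION & SPEC =====
-- Pre_ excludes inputs where A raises IndexError (fewer speeds than progresses) and inputs with a
-- speed ≤ 0: there A's day simulation usually diverges, and where it happens to return (a task
-- already past 100 with a negative speed) its grouping is an artefact of the simulated values.
def Pre_solution (progresses : List Int) (speeds : List Int) : Prop :=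
  progresses.length ≤ speeds.length ∧ ∀ s ∈ speeds, 1 ≤ s
instance (progresses : List Int) (speeds : List Int) : Decidable (Pre_solution progresses speeds) := by
  unfold Pre_solution; infer_instance

def pvWitness_solution : List Int × List Int := ([93, 30, 55, 60], [1, 30, 5, 10])

def Spec_solution (progresses : List Int) (speeds : List Int) (out : List Int) : Prop := out = solution_alt progresses speeds
instance (progresses : List Int) (speeds : List Int) (out : List Int) : Decidable (Spec_solution progresses speeds out) := by unfold Spec_solution; infer_instance

-- ===== CLAIM (what is proved, stated in full; the proofs are below) =====
def Claim_equal_solution : Prop := ∀ (progresses : List Int) (speeds : List Int), Dom_solution progresses speeds → Pre_solution progresses speeds → Spec_solution progresses speeds (solution progresses speeds)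

-- ===== LEMMAS AND PROOFS =====

-- completion-day characterisation: for day t ≥ 1, a task is ≥ 100 after t increments iff its day has come
theorem altDays_le_iff (p s t : Int) (hs : 1 ≤ s) (ht : 1 ≤ t) :
    altDays p s ≤ t ↔ 100 ≤ p + t * s := by
  unfold altDays
  have h := PySem.Int.le_floordiv_iff_mul_le (a := p - 100) (b := s) (q := -t) (by omega)
  constructor
  · intro hle
    have : -t ≤ PySem.Int.floordiv (p - 100) s := by omega
    have := h.mp this
    nlinarith [this]
  · intro h100
    have : -t * s ≤ p - 100 := by nlinarith
    have := h.mpr this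
    omega

theorem takeWhile_congr_mem {α : Type} (p q : α → Bool) :
    ∀ (l : List α), (∀ x ∈ l, p x = q x) → l.takeWhile p = l.takeWhile q
  | [], _ => rfl
  | x :: xs, h => by
    simp only [List.takeWhile_cons, h x (by simp)]
    cases hq : q x with
    | false => simp
    | true => simp [takeWhile_congr_mem p q xs (fun y hy => h y (by simp [hy]))]

theorem dropWhile_congr_mem {α : Type} (p q : α → Bool) :
    ∀ (l : List α), (∀ x ∈ l, p x = q x) → l.dropWhile p = l.dropWhile q
  | [], _ => rfl
  | x :: xs, h => by
    simp only [List.dropWhile_cons, h x (by simp)]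
    cases hq : q x with
    | false => simp
    | true => simp [dropWhile_congr_mem p q xs (fun y hy => h y (by simp [hy]))]

theorem solInner_eq (f : Int × Int → Int) :
    ∀ (L : List (Int × Int)) (rest : List Int) (c : Int),
      solInner (L.map f) (L.map Prod.snd ++ rest) c =
        ((L.dropWhile (fun x => decide (100 ≤ f x))).map f,
         (L.dropWhile (fun x => decide (100 ≤ f x))).map Prod.snd ++ rest,
         c + ((L.takeWhile (fun x => decide (100 ≤ f x))).length : Int))
  | [], rest, c => by simp [solInner]
  | x :: xs, rest, c => by
    by_cases hx : 100 ≤ f x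
    · have ih := solInner_eq f xs rest (c + 1)
      simp only [List.map_cons, List.cons_append, solInner, if_pos hx, List.drop_succ_cons,
        List.drop_zero] at *
      rw [ih]
      simp only [List.takeWhile_cons, List.dropWhile_cons, hx, decide_true]
      refine Prod.ext rfl (Prod.ext rfl ?_)
      simp only [if_true, List.length_cons]
      push_cast
      ring
    · simp [solInner, hx]

theorem zip_map_append {α β γ : Type} (f : α → β) (g : α → γ) :
    ∀ (L : List α) (rest : List γ),
      (L.map f).zip (L.map g ++ rest) = L.map (fun x => (f x, g x))
  | [], _ => rfl
  | x :: xs, rest => by simp [zip_map_append f g xs rest]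

theorem map_snd_zip_append :
    ∀ (ps ss : List Int), ps.length ≤ ss.length →
      (ps.zip ss).map Prod.snd ++ ss.drop ps.length = ss
  | [], ss, _ => by simp
  | p :: ps, [], h => by simp at h
  | p :: ps, s :: ss, h => by
    simp only [List.zip_cons_cons, List.map_cons, List.cons_append]
    simp [map_snd_zip_append ps ss (by simpa using h)]

theorem solLoop_eq :
    ∀ (fuel : Nat) (L : List (Int × Int)) (rest answer : List Int) (t : Int),
      0 ≤ t →
      (∀ x ∈ L, 1 ≤ x.2) →
      (∀ x ∈ L, altDays x.1 x.2 ≤ t + fuel) →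
      (∀ y ∈ L.head?, t < altDays y.1 y.2) →
      solLoop fuel (L.map (fun x => x.1 + t * x.2)) (L.map Prod.snd ++ rest) answer
        = answer ++ altGroups (L.map (fun x => altDays x.1 x.2)) := by
  intro fuel
  induction fuel with
  | zero =>
    intro L rest answer t ht hs hf hhd
    cases L with
    | nil => simp [solLoop, altGroups]
    | cons x xs =>
      exfalso
      have h1 := hf x (by simp)
      have h2 := hhd x (by simp [List.head?])
      omega
  | succ fuel ih =>
    intro L rest answer t ht hs hf hhd
    cases L with
    | nil => simp [solLoop, altGroups]
    | cons x xs =>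
      have hmapfun : ((fun z : Int × Int => z.1 + z.2) ∘ (fun y : Int × Int => (y.1 + t * y.2, y.2)))
          = (fun y : Int × Int => y.1 + (t + 1) * y.2) := funext fun y => by
        simp [Function.comp]; ring
      have hpq' : (((x :: xs).map (fun y => y.1 + t * y.2)).zip ((x :: xs).map Prod.snd ++ rest)).map
            (fun z => z.1 + z.2) = (x :: xs).map (fun y => y.1 + (t + 1) * y.2) := by
        rw [zip_map_append (fun y => y.1 + t * y.2) Prod.snd (x :: xs) rest, List.map_map, hmapfun]
      have hdx1 : t < altDays x.1 x.2 := hhd x (by simp [List.head?])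
      have hsx : 1 ≤ x.2 := hs x (by simp)
      rw [solLoop, if_neg (by simp), hpq']
      by_cases hpop : 100 ≤ x.1 + (t + 1) * x.2
      · -- the front finishes today: day of x is exactly t+1
        have hdx : altDays x.1 x.2 = t + 1 := by
          have := (altDays_le_iff x.1 x.2 (t + 1) hsx (by omega)).mpr hpop
          omega
        rw [if_pos (by simpa using hpop)]
        rw [solInner_eq (fun y => y.1 + (t + 1) * y.2) (x :: xs) rest 0]
        dsimp only
        -- switch the pop predicate to the completion-day predicate
        have hPQ : ∀ y ∈ x :: xs, (fun y : Int × Int => decide (100 ≤ y.1 + (t + 1) * y.2)) y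
            = (fun y : Int × Int => decide (altDays y.1 y.2 ≤ t + 1)) y := by
          intro y hy
          simp only [decide_eq_decide]
          exact (altDays_le_iff y.1 y.2 (t + 1) (hs y hy) (by omega)).symm
        rw [takeWhile_congr_mem _ _ _ hPQ, dropWhile_congr_mem _ _ _ hPQ]
        set Q : Int × Int → Bool := fun y => decide (altDays y.1 y.2 ≤ t + 1) with hQ
        have hQx : Q x = true := by simp [hQ, hdx]
        have htw : (x :: xs).takeWhile Q = x :: xs.takeWhile Q := by simp [hQx]
        have hdw : (x :: xs).dropWhile Q = xs.dropWhile Q := by simp [hQx]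
        rw [htw, hdw]
        simp only [List.length_cons]
        rw [if_pos (by positivity)]
        rw [ih (xs.dropWhile Q) rest _ (t + 1) (by omega)
          (fun y hy => hs y (List.mem_cons_of_mem x ((List.dropWhile_sublist Q).subset hy)))
          (fun y hy => by
            have := hf y (List.mem_cons_of_mem x ((List.dropWhile_sublist Q).subset hy))
            omega)
          (fun y hy => by
            have hnot := List.head?_dropWhile_not Q xs
            cases hh : (xs.dropWhile Q).head? with
            | none => rw [hh] at hy; simp at hy
            | some z =>
              rw [hh] at hy hnot; simp at hy
              subst hy
              simp only [hQ, decide_eq_false_iff_not, not_le] at hnot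
              exact hnot)]
        -- fold the right-hand side into altGroups of the full list
        rw [List.map_cons, altGroups]
        have htwm : (List.map (fun y : Int × Int => altDays y.1 y.2) xs).takeWhile
            (fun v => decide (v ≤ altDays x.1 x.2)) = List.map (fun y => altDays y.1 y.2) (xs.takeWhile Q) := by
          rw [List.takeWhile_map]
          congr 1
          apply takeWhile_congr_mem
          intro y _
          simp [Function.comp, hQ, hdx]
        have hdwm : (List.map (fun y : Int × Int => altDays y.1 y.2) xs).dropWhile
            (fun v => decide (v ≤ altDays x.1 x.2)) = List.map (fun y => altDays y.1 y.2) (xs.dropWhile Q) := by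
          rw [List.dropWhile_map]
          congr 1
          apply dropWhile_congr_mem
          intro y _
          simp [Function.comp, hQ, hdx]
        rw [htwm, hdwm, List.length_map]
        simp only [List.append_assoc, List.singleton_append]
        congr 2
        push_cast
        ring
      · -- nobody finishes today
        rw [if_neg (by simpa using hpop)]
        have hdxgt : t + 1 < altDays x.1 x.2 := by
          by_contra h
          push Not at h
          exact hpop ((altDays_le_iff x.1 x.2 (t + 1) hsx (by omega)).mp h)
        exact ih (x :: xs) rest answer (t + 1) (by omega) hs
          (fun y hy => by have := hf y hy; omega)
          (fun y hy => by simp [List.head?] at hy; subst hy; omega)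

-- ===== VERDICT (by name: the statement is the Claim_ definition above) =====
theorem solution_spec : Claim_equal_solution := by
  intro ps ss _dom pre
  unfold Spec_solution
  obtain ⟨hlen, hpos⟩ := pre
  have hzip : ∀ x ∈ ps.zip ss, 1 ≤ x.2 := fun x hx => hpos x.2 (List.of_mem_zip hx).2
  have hps : ps = (ps.zip ss).map Prod.fst := (List.map_fst_zip hlen).symm
  have hss : ss = (ps.zip ss).map Prod.snd ++ ss.drop ps.length := (map_snd_zip_append ps ss hlen).symm
  have hfuel1 : 1 ≤ solFuel ps := by unfold solFuel; omega
  have hfuel : ∀ x ∈ ps.zip ss, altDays x.1 x.2 ≤ 0 + (solFuel ps : Int) := by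
    intro x hx
    have hs := hzip x hx
    have hmem : (101 - x.1).toNat ≤ (ps.map (fun p => (101 - p).toNat)).sum := by
      apply List.single_le_sum (by intro y hy; omega)
      exact List.mem_map_of_mem (List.of_mem_zip hx).1
    have hF : (101 : Int) - x.1 ≤ (solFuel ps : Int) := by
      have h2 : (101 - x.1).toNat ≤ solFuel ps := by unfold solFuel; omega
      omega
    rw [show (0 : Int) + (solFuel ps : Int) = (solFuel ps : Int) from by ring,
      altDays_le_iff x.1 x.2 _ hs (by exact_mod_cast hfuel1)]
    nlinarith [hF, hs, hfuel1]
  have hhd : ∀ y ∈ (ps.zip ss).head?, (0:Int) < altDays y.1 y.2 := by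
    intro y _; unfold altDays; omega
  have := solLoop_eq (solFuel ps) (ps.zip ss) (ss.drop ps.length) [] 0 le_rfl hzip
      (by simpa using hfuel) hhd
  unfold solution solution_alt
  rw [show (fun x : Int × Int => x.1 + 0 * x.2) = Prod.fst from funext (fun x => by ring),
    List.map_fst_zip hlen, map_snd_zip_append ps ss hlen] at this
  simpa using this
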